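-- pv_equiv track=rewrite | github.com/colinpearse/advent-of-code-2019 | aofc2019.q23.py | out2arr
-- ===== SOURCE A (Python) =====
-- def out2arr(O, remO=[]):
--     line = []
--     lines = []
--     for e in O:
--         if e == 10:
--             lines.append(''.join(line))
--             line = []
--         else:
--             if e not in remO:
--                 if e <= 0 or e > 255:
--                     line.append('chr('+str(e)+')')
--                 else:
--                     line.append(chr(e))
--     return lines
-- ===== SOURCE B (Python) =====
-- def out2arr(O, remO=[]):
--     def tok(e):
--         if e == 10:
--             return '\n'
--         if e in remO:
--             return ''
--         if e <= 0 or e > 255: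
--             return 'chr(' + str(e) + ')'
--         return chr(e)
--     return ''.join(map(tok, O)).split('\n')[:-1]
-- ===== Notes on version B (the rewrite author's own statement) =====
-- stated objective: idiomatic
-- what changed: A's buffer-and-flush loop (accumulate chars, emit a line on each 10) is replaced by a per-element token map ('\n' for 10, '' for filtered codes, chr(e)-text or the character otherwise) joined into one string and split on '\n' with the trailing segment dropped.
import Mathlib
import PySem

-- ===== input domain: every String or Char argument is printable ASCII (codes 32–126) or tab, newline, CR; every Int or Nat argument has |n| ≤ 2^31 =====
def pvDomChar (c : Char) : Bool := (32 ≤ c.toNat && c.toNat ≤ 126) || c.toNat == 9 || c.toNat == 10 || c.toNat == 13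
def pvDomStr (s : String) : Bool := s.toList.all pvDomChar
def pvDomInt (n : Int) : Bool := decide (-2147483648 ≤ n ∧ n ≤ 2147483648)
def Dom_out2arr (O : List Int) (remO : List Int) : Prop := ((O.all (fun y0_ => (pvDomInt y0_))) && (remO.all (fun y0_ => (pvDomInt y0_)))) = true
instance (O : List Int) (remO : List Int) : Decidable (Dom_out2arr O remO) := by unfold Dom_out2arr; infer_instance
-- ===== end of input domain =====

-- B replaces A's buffer-flush accumulation by mapping each code to a token string,
-- joining and splitting on '\n' (dropping the trailing segment): idiomatic, same cost.


-- ===== PORT A =====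
-- one iteration of A's loop over the state (line, lines)
def out2arrStep (remO : List Int) (st : List String × List String) (e : Int) :
    List String × List String :=
  if e = 10 then ([], st.2 ++ [PySem.Str.join "" st.1])
  else if e ∈ remO then st
  else if e ≤ 0 ∨ 255 < e then (st.1 ++ ["chr(" ++ PySem.Int.toStr e ++ ")"], st.2)
  else (st.1 ++ [String.singleton (Char.ofNat e.toNat)], st.2)

def out2arr (O : List Int) (remO : List Int) : List String :=
  (O.foldl (out2arrStep remO) ([], [])).2

-- ===== PORT B =====
-- B's per-element token (Source B's tok)
def out2arrTok (remO : List Int) (e : Int) : String :=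
  if e = 10 then "\n"
  else if e ∈ remO then ""
  else if e ≤ 0 ∨ 255 < e then "chr(" ++ PySem.Int.toStr e ++ ")"
  else String.singleton (Char.ofNat e.toNat)

def out2arr_alt (O : List Int) (remO : List Int) : List String :=
  let s := PySem.Str.join "" (O.map (out2arrTok remO))
  (((PySem.Chars.splitOn s.toList ['\n']).map String.ofList)).dropLast

-- ===== PRECONDITION & SPEC =====
def Spec_out2arr (O : List Int) (remO : List Int) (out : List String) : Prop := out = out2arr_alt O remO
instance (O : List Int) (remO : List Int) (out : List String) : Decidable (Spec_out2arr O remO out) := by unfold Spec_out2arr; infer_instance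

-- ===== CLAIM (what is proved, stated in full; the proofs are below) =====
def Claim_equal_out2arr : Prop := ∀ (O : List Int) (remO : List Int), Dom_out2arr O remO → Spec_out2arr O remO (out2arr O remO)

-- ===== LEMMAS AND PROOFS =====

-- clean recursive splitting on '\n' used to characterise PySem.Chars.splitOn
def splitNl : List Char → List (List Char)
  | [] => [[]]
  | c :: t => if c = '\n' then [] :: splitNl t else (splitNl t).modifyHead (c :: ·)

theorem splitNl_ne_nil (l : List Char) : splitNl l ≠ [] := by
  cases l with
  | nil => simp [splitNl]
  | cons c t =>
    simp only [splitNl]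
    split
    · simp
    · intro h
      have := splitNl_ne_nil t
      cases hh : splitNl t with
      | nil => exact this hh
      | cons a s => rw [hh] at h; simp at h

theorem go_eq (l : List Char) : ∀ (fuel : Nat), l.length ≤ fuel →
    ∀ (cur : List Char) (acc : List (List Char)),
    PySem.Chars.splitOn.go ['\n'] fuel l cur acc
      = acc.reverse ++ (splitNl l).modifyHead (cur.reverse ++ ·) := by
  induction l with
  | nil =>
    intro fuel _ cur acc
    cases fuel <;> simp [PySem.Chars.splitOn.go, splitNl]
  | cons c t ih =>
    intro fuel hf cur acc
    cases fuel with
    | zero => simp at hf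
    | succ f =>
      have hft : t.length ≤ f := by simpa using hf
      by_cases hc : c = '\n'
      · subst hc
        rw [PySem.Chars.splitOn.go]
        simp only [List.isPrefixOf, Bool.and_true, beq_self_eq_true, if_pos, List.length_cons,
          List.length_nil, List.drop_succ_cons, List.drop_zero]
        rw [ih f hft [] (cur.reverse :: acc)]
        simp only [splitNl, List.reverse_cons, List.append_assoc, List.singleton_append]
        cases splitNl t <;> simp
      · rw [PySem.Chars.splitOn.go]
        have : ['\n'].isPrefixOf (c :: t) = false := by
          simp [List.isPrefixOf]; exact fun h => (hc h.symm).elim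
        rw [this]
        simp only [Bool.false_eq_true, if_false]
        rw [ih f hft (c :: cur) acc]
        rw [splitNl]
        simp only [if_neg hc]
        congr 1
        cases hs : splitNl t with
        | nil => exact absurd hs (splitNl_ne_nil t)
        | cons a s => simp [List.modifyHead]

theorem splitOn_eq_splitNl (cs : List Char) :
    PySem.Chars.splitOn cs ['\n'] = splitNl cs := by
  rw [PySem.Chars.splitOn, go_eq cs (cs.length + 1) (by omega) [] []]
  cases hs : splitNl cs with
  | nil => exact absurd hs (splitNl_ne_nil cs)
  | cons a s => simp [List.modifyHead]

theorem splitNl_append_of_no_nl (cs t : List Char) (h : '\n' ∉ cs) :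
    splitNl (cs ++ t) = (splitNl t).modifyHead (cs ++ ·) := by
  induction cs with
  | nil =>
    cases hs : splitNl t with
    | nil => exact absurd hs (splitNl_ne_nil t)
    | cons a s => simp [hs]
  | cons c cs' ih =>
    have hc : c ≠ '\n' := fun hc => h (by simp [hc])
    have h' : '\n' ∉ cs' := fun hm => h (by simp [hm])
    simp only [List.cons_append, splitNl, if_neg hc, ih h']
    cases hs : splitNl t with
    | nil => exact absurd hs (splitNl_ne_nil t)
    | cons a s => simp [List.modifyHead]

theorem splitNl_no_nl (cs : List Char) (h : '\n' ∉ cs) : splitNl cs = [cs] := by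
  have := splitNl_append_of_no_nl cs [] h
  simpa [splitNl] using this

theorem join_empty_toList (l : List String) :
    (PySem.Str.join "" l).toList = (l.map String.toList).flatten := by
  rw [PySem.Str.join]
  have : PySem.Chars.join ([] : List Char) (l.map String.toList)
      = (l.map String.toList).flatten := by
    rw [PySem.Chars.join]
    induction (l.map String.toList) with
    | nil => rfl
    | cons h t ih => cases t <;> simp_all [List.intercalate]
  simp [this]

theorem no_nl_toStr (e : Int) : '\n' ∉ ("chr(" ++ PySem.Int.toStr e ++ ")").toList := by
  intro hmem
  simp only [String.toList_append, List.mem_append] at hmem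
  rcases hmem with (h | h) | h
  · exact absurd h (by decide)
  · rw [PySem.Int.toStr] at h
    simp only [String.toList_ofList] at h
    rw [PySem.Int.toChars] at h
    have hd : ∀ m : Nat, '\n' ∈ Nat.toDigits 10 m → False := by
      intro m hm
      have := Nat.isDigit_of_mem_toDigits (by norm_num) (by norm_num) hm
      simp [Char.isDigit] at this
    split at h
    · rcases List.mem_cons.1 h with h | h
      · exact absurd h (by decide)
      · exact hd _ h
    · exact hd _ h
  · exact absurd h (by decide)

theorem no_nl_singleton (e : Int) (h10 : e ≠ 10) (hpos : ¬ (e ≤ 0 ∨ 255 < e)) :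
    '\n' ∉ (String.singleton (Char.ofNat e.toNat)).toList := by
  push Not at hpos
  intro hmem
  simp only [String.singleton_eq_ofList, String.toList_ofList, List.mem_singleton] at hmem
  have hval : e.toNat.isValidChar := by
    left
    have : e.toNat ≤ 255 := by omega
    omega
  have h2 := congrArg Char.toNat hmem.symm
  rw [show (Char.ofNat e.toNat).toNat = e.toNat by
    simp [Char.ofNat, Char.ofNatAux, hval, Char.toNat]] at h2
  have : e.toNat = 10 := by simpa using h2
  omega

theorem out2arr_loop_eq (remO : List Int) (O : List Int) :
    ∀ (line lines : List String), '\n' ∉ ((line.map String.toList).flatten) →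
    (O.foldl (out2arrStep remO) (line, lines)).2
      = lines ++ (((splitNl ((line.map String.toList).flatten
            ++ ((O.map (out2arrTok remO)).map String.toList).flatten)).map String.ofList).dropLast) := by
  induction O with
  | nil =>
    intro line lines hline
    simp only [List.foldl_nil, List.map_nil, List.flatten_nil, List.append_nil]
    rw [splitNl_no_nl _ hline]
    simp
  | cons e O' ih =>
    intro line lines hline
    simp only [List.foldl_cons, List.map_cons, List.flatten_cons]
    by_cases h10 : e = 10
    · subst h10
      have hstep : out2arrStep remO (line, lines) 10
          = ([], lines ++ [PySem.Str.join "" line]) := by simp [out2arrStep]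
      have htok : (out2arrTok remO 10).toList = ['\n'] := by simp [out2arrTok]
      rw [hstep, htok, ih [] (lines ++ [PySem.Str.join "" line]) (by simp)]
      simp only [List.map_nil, List.flatten_nil, List.nil_append, List.singleton_append]
      have hsplit : splitNl ((line.map String.toList).flatten
            ++ ('\n' :: ((O'.map (out2arrTok remO)).map String.toList).flatten))
          = (line.map String.toList).flatten
            :: splitNl (((O'.map (out2arrTok remO)).map String.toList).flatten) := by
        rw [splitNl_append_of_no_nl _ _ hline, splitNl]
        cases hs : splitNl (((O'.map (out2arrTok remO)).map String.toList).flatten) with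
        | nil => exact absurd hs (splitNl_ne_nil _)
        | cons a s => simp [List.modifyHead]
      rw [hsplit]
      simp only [List.map_cons]
      rw [List.dropLast_cons_of_ne_nil (by
        intro hnil
        exact splitNl_ne_nil _ (List.map_eq_nil_iff.1 hnil))]
      have hline_str : String.ofList ((line.map String.toList).flatten)
          = PySem.Str.join "" line := by
        rw [← join_empty_toList, String.ofList_toList]
      rw [hline_str]
      simp
    · by_cases hrem : e ∈ remO
      · have hstep : out2arrStep remO (line, lines) e = (line, lines) := by
          simp [out2arrStep, if_neg h10, hrem]
        have htok : (out2arrTok remO e).toList = [] := by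
          simp [out2arrTok, if_neg h10, hrem]
        rw [hstep, htok, ih line lines hline]
        simp
      · -- a non-newline token t is appended to line on both sides
        have key : ∀ t : String, '\n' ∉ t.toList →
            (O'.foldl (out2arrStep remO) (line ++ [t], lines)).2
              = lines ++ (((splitNl ((line.map String.toList).flatten
                  ++ (t.toList ++ ((O'.map (out2arrTok remO)).map String.toList).flatten))).map
                    String.ofList).dropLast) := by
          intro t hnl
          have hline' : '\n' ∉ (((line ++ [t]).map String.toList).flatten) := by
            simp only [List.map_append, List.map_cons, List.map_nil, List.flatten_append,
              List.flatten_cons, List.flatten_nil, List.append_nil, List.mem_append]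
            rintro (h | h)
            · exact hline h
            · exact hnl h
          rw [ih (line ++ [t]) lines hline']
          simp [List.append_assoc]
        by_cases hbig : e ≤ 0 ∨ 255 < e
        · have hstep : out2arrStep remO (line, lines) e
              = (line ++ ["chr(" ++ PySem.Int.toStr e ++ ")"], lines) := by
            simp [out2arrStep, if_neg h10, hrem, hbig]
          have htok : out2arrTok remO e = "chr(" ++ PySem.Int.toStr e ++ ")" := by
            simp [out2arrTok, if_neg h10, hrem, hbig]
          rw [hstep, htok, key _ (no_nl_toStr e)]
        · have hstep : out2arrStep remO (line, lines) e
              = (line ++ [String.singleton (Char.ofNat e.toNat)], lines) := by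
            simp [out2arrStep, if_neg h10, hrem, hbig]
          have htok : out2arrTok remO e = String.singleton (Char.ofNat e.toNat) := by
            simp [out2arrTok, if_neg h10, hrem, hbig]
          rw [hstep, htok, key _ (no_nl_singleton e h10 hbig)]

-- ===== VERDICT (by name: the statement is the Claim_ definition above) =====
theorem out2arr_spec : Claim_equal_out2arr := by
  intro O remO _
  unfold Spec_out2arr out2arr out2arr_alt
  rw [out2arr_loop_eq remO O [] [] (by simp)]
  simp only [List.map_nil, List.flatten_nil, List.nil_append, List.map_map]
  rw [join_empty_toList, splitOn_eq_splitNl]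
  simp [List.map_map]
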